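-- pv_equiv track=rewrite | github.com/Dadudekc/AutoDream.Os | src/core/performance/performance_core.py | calculate_performance_level
-- ===== SOURCE A (Python) =====
-- from typing import Dict, List, Optional, Any
--
-- def calculate_performance_level(validation_results: Dict[str, Any]) -> str:
--     """
--     Calculate overall performance level based on validation results.
--
--     Args:
--         validation_results: Results from validate_metrics()
--
--     Returns:
--         Performance level: 'excellent', 'good', 'acceptable', 'poor', 'critical'
--     """
--     critical_failures = 0
--     warning_failures = 0
--     total_rules = len(validation_results)
--
--     for rule_name, result in validation_results.items():
--         if result["status"] == "fail":
--             if result["severity"] == "critical":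
--                 critical_failures += 1
--             elif result["severity"] == "warning":
--                 warning_failures += 1
--
--     # Determine performance level
--     if critical_failures == 0 and warning_failures == 0:
--         return "excellent"
--     elif critical_failures == 0 and warning_failures <= 1:
--         return "good"
--     elif critical_failures == 0 and warning_failures <= 2:
--         return "acceptable"
--     elif critical_failures == 0:
--         return "poor"
--     else:
--         return "critical"
-- ===== SOURCE B (Python) =====
-- _DEMOTE = {"excellent": "good", "good": "acceptable", "acceptable": "poor", "poor": "poor"}
--
-- def calculate_performance_level(validation_results):
--     level = "excellent"
--     for result in validation_results.values():
--         if result["status"] == "fail":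
--             severity = result["severity"]
--             if severity == "critical":
--                 return "critical"
--             if severity == "warning":
--                 level = _DEMOTE[level]
--     return level
-- ===== Notes on version B (the rewrite author's own statement) =====
-- stated objective: alternative
-- what changed: B keeps no counters at all: it runs a worst-so-far state machine on the level string itself, demoting one step per warning failure via a transition table and returning early at the first critical failure, whereas A accumulates two counters over the whole dict and then walks an if/elif ladder.
import Mathlib
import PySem

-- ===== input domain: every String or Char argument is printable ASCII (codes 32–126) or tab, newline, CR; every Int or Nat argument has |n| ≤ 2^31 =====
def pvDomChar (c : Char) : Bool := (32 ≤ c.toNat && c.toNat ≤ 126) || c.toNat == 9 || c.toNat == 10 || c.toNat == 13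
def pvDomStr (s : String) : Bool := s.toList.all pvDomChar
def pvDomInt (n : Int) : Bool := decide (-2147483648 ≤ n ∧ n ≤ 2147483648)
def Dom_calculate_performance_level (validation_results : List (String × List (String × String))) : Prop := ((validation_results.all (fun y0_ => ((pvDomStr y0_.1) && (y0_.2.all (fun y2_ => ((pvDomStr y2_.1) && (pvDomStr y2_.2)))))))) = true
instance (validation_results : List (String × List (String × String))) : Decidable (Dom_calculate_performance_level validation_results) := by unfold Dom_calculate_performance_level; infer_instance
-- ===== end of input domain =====

-- B replaces A's two-counter accumulation plus if/elif ladder by a counter-free worst-so-far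
-- state machine on the level string itself (one demotion step per warning failure, early return
-- on the first critical failure); objective: alternative.


-- ===== PORT A =====
-- result["status"] / result["severity"]: Python dict lookup; `none` = KeyError (excluded by Pre_)
def calculate_performance_level (validation_results : List (String × List (String × String))) : String :=
  let counts : Int × Int := validation_results.foldl (fun (cw : Int × Int) p =>
    if ((PySem.Dict.mk p.2).get? "status").getD "" == "fail" then
      if ((PySem.Dict.mk p.2).get? "severity").getD "" == "critical" then (cw.1 + 1, cw.2)
      else if ((PySem.Dict.mk p.2).get? "severity").getD "" == "warning" then (cw.1, cw.2 + 1)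
      else cw
    else cw) (0, 0)
  if counts.1 == 0 && counts.2 == 0 then "excellent"
  else if counts.1 == 0 && counts.2 ≤ 1 then "good"
  else if counts.1 == 0 && counts.2 ≤ 2 then "acceptable"
  else if counts.1 == 0 then "poor"
  else "critical"

-- ===== PORT B =====
-- B's module-level _DEMOTE transition table (Python dict → association list; lookup never
-- misses because the loop state is always one of the four keys).
def pvDemote : PySem.Dict String String :=
  PySem.Dict.mk [("excellent", "good"), ("good", "acceptable"), ("acceptable", "poor"), ("poor", "poor")]

-- Source B's for-loop with its early `return "critical"`, as structural recursion on the items.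
def pvLoopB : List (String × List (String × String)) → String → String
  | [], level => level
  | p :: t, level =>
    if ((PySem.Dict.mk p.2).get? "status").getD "" == "fail" then
      let severity := ((PySem.Dict.mk p.2).get? "severity").getD ""
      if severity == "critical" then "critical"
      else if severity == "warning" then pvLoopB t ((pvDemote.get? level).getD "")
      else pvLoopB t level
    else pvLoopB t level

def calculate_performance_level_alt (validation_results : List (String × List (String × String))) : String :=
  pvLoopB validation_results "excellent"

-- ===== PRECONDITION & SPEC =====
-- Pre_ excludes (a) inputs on which A raises KeyError (an inner dict missing "status", or missing
-- "severity" when its status is "fail"), and (b) association lists with duplicate outer or inner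
-- keys, which do not correspond to a unique Python dict (first-vs-last-match representation corner).
def Pre_calculate_performance_level (validation_results : List (String × List (String × String))) : Prop :=
  (validation_results.map (·.1)).Nodup ∧
  ∀ p ∈ validation_results, (p.2.map (·.1)).Nodup ∧
    ((PySem.Dict.mk p.2).get? "status").isSome = true ∧
    (((PySem.Dict.mk p.2).get? "status").getD "" = "fail" →
      ((PySem.Dict.mk p.2).get? "severity").isSome = true)
instance (validation_results : List (String × List (String × String))) : Decidable (Pre_calculate_performance_level validation_results) := by unfold Pre_calculate_performance_level; infer_instance

def pvWitness_calculate_performance_level : (List (String × List (String × String))) :=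
  [("rule1", [("status", "fail"), ("severity", "warning")]), ("rule2", [("status", "pass")])]

def Spec_calculate_performance_level (validation_results : List (String × List (String × String))) (out : String) : Prop := out = calculate_performance_level_alt validation_results
instance (validation_results : List (String × List (String × String))) (out : String) : Decidable (Spec_calculate_performance_level validation_results out) := by unfold Spec_calculate_performance_level; infer_instance

-- ===== CLAIM (what is proved, stated in full; the proofs are below) =====
def Claim_equal_calculate_performance_level : Prop := ∀ (validation_results : List (String × List (String × String))), Dom_calculate_performance_level validation_results → Pre_calculate_performance_level validation_results → Spec_calculate_performance_level validation_results (calculate_performance_level validation_results)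

-- ===== LEMMAS AND PROOFS =====

-- the level table; B's loop state is always tbl k for some k ≤ 3
def pvTbl (k : Nat) : String := (["excellent", "good", "acceptable", "poor"].getD k "")

-- the failing severities of the input, and the two counts, as plain functions
def pvSevs (l : List (String × List (String × String))) : List String :=
  l.filterMap (fun p =>
    if ((PySem.Dict.mk p.2).get? "status").getD "" == "fail" then
      some (((PySem.Dict.mk p.2).get? "severity").getD "")
    else none)

def pvCrit (l : List (String × List (String × String))) : Nat :=
  ((pvSevs l).filter (fun s => s == "critical")).length
def pvWarn (l : List (String × List (String × String))) : Nat :=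
  ((pvSevs l).filter (fun s => s == "warning")).length

-- one demotion step on a table entry moves the index one step, saturating at 3
theorem pvDemote_tbl (k : Nat) (hk : k ≤ 3) :
    ((pvDemote.get? (pvTbl k)).getD "") = pvTbl (min (k + 1) 3) := by
  interval_cases k <;> decide

-- invariant of B's loop: starting at state tbl k it computes critical/saturating-warning semantics
theorem pvLoopB_inv (l : List (String × List (String × String))) (k : Nat) (hk : k ≤ 3) :
    pvLoopB l (pvTbl k)
      = if pvCrit l > 0 then "critical" else pvTbl (min (k + pvWarn l) 3) := by
  induction l generalizing k with
  | nil => simp [pvLoopB, pvCrit, pvWarn, pvSevs, Nat.min_eq_left hk]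
  | cons p t ih =>
    by_cases hs : (((PySem.Dict.mk p.2).get? "status").getD "" == "fail") = true
    · have hs' := beq_iff_eq.mp hs
      by_cases hcr : ((((PySem.Dict.mk p.2).get? "severity").getD "") == "critical") = true
      · have hcr' := beq_iff_eq.mp hcr
        have : pvCrit (p :: t) > 0 := by
          simp [pvCrit, pvSevs, List.filterMap_cons, hs', List.filter_cons, hcr']
        simp [pvLoopB, hs, hcr, this]
      · have hcr' : ¬ (((PySem.Dict.mk p.2).get? "severity").getD "") = "critical" := by
          simpa using hcr
        by_cases hwn : ((((PySem.Dict.mk p.2).get? "severity").getD "") == "warning") = true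
        · have hwn' := beq_iff_eq.mp hwn
          have hcrit : pvCrit (p :: t) = pvCrit t := by
            simp [pvCrit, pvSevs, List.filterMap_cons, hs', List.filter_cons, hcr']
          have hwarn : pvWarn (p :: t) = pvWarn t + 1 := by
            simp [pvWarn, pvSevs, List.filterMap_cons, hs', List.filter_cons, hwn']
          rw [show pvLoopB (p :: t) (pvTbl k)
                = pvLoopB t ((pvDemote.get? (pvTbl k)).getD "") by simp [pvLoopB, hs, hcr, hwn],
              pvDemote_tbl k hk, ih _ (by omega), hcrit, hwarn]
          congr 1
          congr 1
          omega
        · have hwn' : ¬ (((PySem.Dict.mk p.2).get? "severity").getD "") = "warning" := by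
            simpa using hwn
          have hcrit : pvCrit (p :: t) = pvCrit t := by
            simp [pvCrit, pvSevs, List.filterMap_cons, hs', List.filter_cons, hcr']
          have hwarn : pvWarn (p :: t) = pvWarn t := by
            simp [pvWarn, pvSevs, List.filterMap_cons, hs', List.filter_cons, hwn']
          rw [show pvLoopB (p :: t) (pvTbl k) = pvLoopB t (pvTbl k) by
                simp [pvLoopB, hs, hcr, hwn],
              ih _ hk, hcrit, hwarn]
    · have hs' : ¬ (((PySem.Dict.mk p.2).get? "status").getD "") = "fail" := by simpa using hs
      have hcrit : pvCrit (p :: t) = pvCrit t := by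
        simp [pvCrit, pvSevs, List.filterMap_cons, hs']
      have hwarn : pvWarn (p :: t) = pvWarn t := by
        simp [pvWarn, pvSevs, List.filterMap_cons, hs']
      rw [show pvLoopB (p :: t) (pvTbl k) = pvLoopB t (pvTbl k) by simp [pvLoopB, hs],
          ih _ hk, hcrit, hwarn]

-- A's fold, started from any accumulator, adds the two counts
theorem pvFoldCounts (l : List (String × List (String × String))) (c w : Int) :
    l.foldl (fun (cw : Int × Int) p =>
      if ((PySem.Dict.mk p.2).get? "status").getD "" == "fail" then
        if ((PySem.Dict.mk p.2).get? "severity").getD "" == "critical" then (cw.1 + 1, cw.2)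
        else if ((PySem.Dict.mk p.2).get? "severity").getD "" == "warning" then (cw.1, cw.2 + 1)
        else cw
      else cw) (c, w)
    = (c + (pvCrit l : Int), w + (pvWarn l : Int)) := by
  induction l generalizing c w with
  | nil => simp [pvCrit, pvWarn, pvSevs]
  | cons p t ih =>
    simp only [List.foldl_cons]
    by_cases hs : (((PySem.Dict.mk p.2).get? "status").getD "" == "fail") = true
    · by_cases hcr : ((((PySem.Dict.mk p.2).get? "severity").getD "") == "critical") = true
      · have hwn : ((((PySem.Dict.mk p.2).get? "severity").getD "") == "warning") = false := by
          have h := beq_iff_eq.mp hcr; simp [h]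
        rw [if_pos hs, if_pos hcr, ih]
        simp only [pvCrit, pvWarn, pvSevs, List.filterMap_cons, hs, if_pos, List.filter_cons,
          hcr, hwn, List.length_cons, Prod.mk.injEq]
        constructor <;> push_cast <;> ring
      · by_cases hwn : ((((PySem.Dict.mk p.2).get? "severity").getD "") == "warning") = true
        · rw [if_pos hs, if_neg hcr, if_pos hwn, ih]
          simp only [pvCrit, pvWarn, pvSevs, List.filterMap_cons, hs, if_pos, List.filter_cons,
            eq_false_of_ne_true hcr, hwn, List.length_cons, Prod.mk.injEq]
          constructor <;> push_cast <;> ring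
        · rw [if_pos hs, if_neg hcr, if_neg hwn, ih]
          simp [pvCrit, pvWarn, pvSevs, beq_iff_eq.mp hs,
            eq_false_of_ne_true hcr, eq_false_of_ne_true hwn]
    · have hs0 : ¬ ((PySem.Dict.mk p.2).get? "status").getD "" = "fail" := by simpa using hs
      rw [if_neg hs, ih]
      simp [pvCrit, pvWarn, pvSevs, hs0]

-- A's ladder on the two counts gives exactly the state machine's answer
theorem pvLadder (c w : Nat) :
    (if ((c : Int) == 0) && ((w : Int) == 0) then "excellent"
     else if ((c : Int) == 0) && ((w : Int) ≤ 1) then "good"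
     else if ((c : Int) == 0) && ((w : Int) ≤ 2) then "acceptable"
     else if ((c : Int) == 0) then "poor"
     else "critical")
    = (if c > 0 then "critical" else pvTbl (min w 3)) := by
  by_cases hc : c = 0
  · subst hc
    rcases (by omega : w = 0 ∨ w = 1 ∨ w = 2 ∨ 3 ≤ w) with h | h | h | h
    · subst h; decide
    · subst h; decide
    · subst h; decide
    · have e0 : ((w : Int) == 0) = false := by simp; omega
      have e1 : ¬ ((w : Int) ≤ 1) := by push_cast; omega
      have e2 : ¬ ((w : Int) ≤ 2) := by push_cast; omega
      simp [e0, e1, e2, Nat.min_eq_right h, pvTbl]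
  · have hcb : ((c : Int) == 0) = false := by simp; omega
    simp [hcb, show c > 0 by omega]

-- ===== VERDICT (by name: the statement is the Claim_ definition above) =====
theorem calculate_performance_level_spec : Claim_equal_calculate_performance_level := by
  intro l _ _
  unfold Spec_calculate_performance_level
  show calculate_performance_level l = calculate_performance_level_alt l
  unfold calculate_performance_level calculate_performance_level_alt
  rw [pvFoldCounts]
  have hB := pvLoopB_inv l 0 (by omega)
  simp only [Nat.zero_add] at hB
  rw [show ("excellent" : String) = pvTbl 0 from rfl, hB]
  simpa using pvLadder (pvCrit l) (pvWarn l)
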